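-- pv_equiv track=rewrite | github.com/lucaspwo/MPtweetBot | tweet.py | enc_percent
-- ===== SOURCE A (Python) =====
-- def enc_percent(s):
--     ret = ''
--     for c in s:
--         ordc = ord(c)
--         if ordc in range(0x30, 0x39 + 1) or \
--            ordc in range(0x41, 0x5a + 1) or \
--            ordc in range(0x61, 0x7a + 1) or \
--            ordc in (0x2d, 0x2e, 0x5f, 0x7e):
--             ret += c
--         else:
--             ret += '%%%02X' % (ordc)
--     return ret
-- ===== SOURCE B (Python) =====
-- import re
--
-- _UNSAFE = re.compile(r'[^0-9A-Za-z\-._~]')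
--
-- def enc_percent(s):
--     return _UNSAFE.sub(lambda m: '%%%02X' % ord(m.group()), s)
-- ===== Notes on version B (the rewrite author's own statement) =====
-- stated objective: idiomatic
-- what changed: Replaced the explicit per-character keep/encode loop with repeated string concatenation by a single regex substitution whose character class matches exactly the non-unreserved characters, with a callback that percent-encodes each match.
import Mathlib
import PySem

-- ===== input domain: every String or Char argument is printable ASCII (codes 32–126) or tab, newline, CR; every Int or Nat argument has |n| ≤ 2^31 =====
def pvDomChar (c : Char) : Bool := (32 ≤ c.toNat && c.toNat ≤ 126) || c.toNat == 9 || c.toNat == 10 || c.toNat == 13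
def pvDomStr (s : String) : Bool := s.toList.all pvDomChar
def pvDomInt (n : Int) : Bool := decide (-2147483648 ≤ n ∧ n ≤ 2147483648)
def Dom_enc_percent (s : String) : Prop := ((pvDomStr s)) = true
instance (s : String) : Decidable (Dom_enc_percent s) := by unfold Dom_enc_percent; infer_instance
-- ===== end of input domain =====

-- B rewrites the per-character keep/encode loop as one regex substitution (same return value; idiomatic rewrite).

-- ===== PORT A =====
-- '%%%02X' % ordc for a printable-ASCII char: '%' followed by two upper-case hex digits
def pvHexDigit (n : Nat) : Char :=
  if n < 10 then Char.ofNat (48 + n) else Char.ofNat (55 + n)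

def pvPct (c : Char) : List Char :=
  ['%', pvHexDigit (c.toNat / 16), pvHexDigit (c.toNat % 16)]

-- A's safe test, branch for branch
def pvSafeA (o : Nat) : Bool :=
  (0x30 <= o && o <= 0x39) || (0x41 <= o && o <= 0x5a) ||
  (0x61 <= o && o <= 0x7a) || (o == 0x2d || o == 0x2e || o == 0x5f || o == 0x7e)

def enc_percent (s : String) : String :=
  String.ofList (s.toList.foldl
    (fun ret c => ret ++ (if pvSafeA c.toNat then [c] else pvPct c)) [])

-- ===== PORT B =====
-- regex class [^0-9A-Za-z\-._~]: a char matches iff it is NOT unreserved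
def pvUnsafeB (c : Char) : Bool :=
  !(('0' <= c && c <= '9') || ('A' <= c && c <= 'Z') ||
    ('a' <= c && c <= 'z') || c == '-' || c == '.' || c == '_' || c == '~')

-- re.sub: every matched char is replaced by the callback's value, the rest copied through
def enc_percent_alt (s : String) : String :=
  String.ofList ((s.toList.map (fun c => if pvUnsafeB c then pvPct c else [c])).flatten)

-- ===== PRECONDITION & SPEC =====
def Spec_enc_percent (s : String) (out : String) : Prop := out = enc_percent_alt s
instance (s : String) (out : String) : Decidable (Spec_enc_percent s out) := by unfold Spec_enc_percent; infer_instance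

-- ===== CLAIM (what is proved, stated in full; the proofs are below) =====
def Claim_equal_enc_percent : Prop := ∀ (s : String), Dom_enc_percent s → Spec_enc_percent s (enc_percent s)

-- ===== LEMMAS AND PROOFS =====
lemma pvSafe_eq (c : Char) : pvSafeA c.toNat = !(pvUnsafeB c) := by
  have e : ∀ d : Char, (c = d) ↔ (c.toNat = d.toNat) := fun _ => eq_iff_eq_of_cmp_eq_cmp rfl
  rw [Bool.eq_iff_iff]
  simp only [pvSafeA, pvUnsafeB, Bool.not_not, Bool.or_eq_true, Bool.and_eq_true,
    decide_eq_true_eq, beq_iff_eq, e, Char.le_def, UInt32.le_iff_toNat_le,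
    show ('0').val.toNat = 48 from rfl, show ('9').val.toNat = 57 from rfl,
    show ('A').val.toNat = 65 from rfl, show ('Z').val.toNat = 90 from rfl,
    show ('a').val.toNat = 97 from rfl, show ('z').val.toNat = 122 from rfl,
    show ('-').toNat = 45 from rfl, show ('.').toNat = 46 from rfl,
    show ('_').toNat = 95 from rfl, show ('~').toNat = 126 from rfl,
    show ∀ d : Char, d.val.toNat = d.toNat from fun _ => rfl]
  omega

lemma encA_loop (l : List Char) (acc : List Char) :
    l.foldl (fun ret c => ret ++ (if pvSafeA c.toNat then [c] else pvPct c)) acc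
      = acc ++ (l.map (fun c => if pvUnsafeB c then pvPct c else [c])).flatten := by
  induction l generalizing acc with
  | nil => simp
  | cons c t ih =>
    rw [List.foldl_cons, ih, List.map_cons, List.flatten_cons, pvSafe_eq c]
    cases pvUnsafeB c <;> simp

-- ===== VERDICT (by name: the statement is the Claim_ definition above) =====
theorem enc_percent_spec : Claim_equal_enc_percent := by
  intro s _
  unfold Spec_enc_percent enc_percent enc_percent_alt
  rw [encA_loop]
  simp
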